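-- pv_equiv track=rewrite | github.com/miliar/Code_Jam_Webscraper | Solutions_python/Problem_157/589.py | check
-- ===== SOURCE A (Python) =====
-- def check(s):
-- 	b = 1
-- 	d = [[[0,1],[1,1],[2,1],[3,1]],[[1,1],[0,-1],[3,1],[2,-1]],[[2,1],[3,-1],[0,-1],[1,1]],[[3,1],[2,1],[1,-1],[0,-1]]]
-- 	cur = 0
-- 	p = 0
-- 	while p < len(s) and (cur != 1 or b != 1):
-- 		if s[p] == "i":
-- 			tmp = 1
-- 		elif s[p] == "j":
-- 			tmp = 2
-- 		else:
-- 			tmp = 3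
-- 		b = b*d[cur][tmp][1]
-- 		cur = d[cur][tmp][0]
-- 		p += 1
-- 	if p == len(s):
-- 		return False
-- 	cur = 0
-- 	b = 1
-- 	while p < len(s) and (cur != 2 or b != 1):
-- 		if s[p] == "i":
-- 			tmp = 1
-- 		elif s[p] == "j":
-- 			tmp = 2
-- 		else:
-- 			tmp = 3
-- 		b = b*d[cur][tmp][1]
-- 		cur = d[cur][tmp][0]
-- 		p += 1
-- 	if p == len(s):
-- 		return False
-- 	cur = 0
-- 	b = 1
-- 	while p < len(s):
-- 		if s[p] == "i":
-- 			tmp = 1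
-- 		elif s[p] == "j":
-- 			tmp = 2
-- 		else:
-- 			tmp = 3
-- 		b = b*d[cur][tmp][1]
-- 		cur = d[cur][tmp][0]
-- 		p += 1
-- 	if cur != 3 or b != 1:
-- 		return False
-- 	return True
-- ===== SOURCE B (Python) =====
-- def check(s):
--     # One cumulative pass: track the running quaternion product (cur, sg),
--     # a stage machine for the two earliest split points, and whether a
--     # non-empty k-suffix remains after the second split.
--     d = [[(0, 1), (1, 1), (2, 1), (3, 1)],
--          [(1, 1), (0, -1), (3, 1), (2, -1)],
--          [(2, 1), (3, -1), (0, -1), (1, 1)],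
--          [(3, 1), (2, 1), (1, -1), (0, -1)]]
--     cur, sg, stage, ok = 0, 1, 0, False
--     for ch in s:
--         if stage == 2:
--             ok = True
--         t = 1 if ch == "i" else 2 if ch == "j" else 3
--         nxt, m = d[cur][t]
--         cur, sg = nxt, sg * m
--         if stage == 0 and cur == 1 and sg == 1:
--             stage = 1
--         elif stage == 1 and cur == 3 and sg == 1:
--             stage = 2
--     return ok and cur == 0 and sg == -1
-- ===== Notes on version B (the rewrite author's own statement) =====
-- stated objective: simpler
-- what changed: Replaces A's three sequential index-based while-loops (find i-prefix, find j-segment, check k-suffix, each restarting from the identity) with a single for-loop fold that keeps the cumulative quaternion prefix product plus a stage machine recording the earliest prefixes equal to i and then k, finally testing that the whole product is -1; the single direct iteration is also measurably faster by a constant factor.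
import Mathlib
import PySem

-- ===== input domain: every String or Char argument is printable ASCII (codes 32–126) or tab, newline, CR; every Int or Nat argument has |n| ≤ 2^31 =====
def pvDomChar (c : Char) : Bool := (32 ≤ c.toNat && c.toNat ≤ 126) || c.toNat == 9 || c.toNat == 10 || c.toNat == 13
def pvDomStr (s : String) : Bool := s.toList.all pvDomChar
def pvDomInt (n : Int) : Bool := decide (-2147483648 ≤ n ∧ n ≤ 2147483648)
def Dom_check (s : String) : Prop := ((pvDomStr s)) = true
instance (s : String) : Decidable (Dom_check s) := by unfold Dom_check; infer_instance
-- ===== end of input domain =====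

-- B replaces A's three reset-to-identity scans by one cumulative prefix-product pass
-- with a stage machine (objective: simpler); return values are proved equal on all strings.

-- ===== PORT A =====
-- the transition table d[cur][tmp] = (new cur, sign factor); exact for the only
-- reachable indices 0–3 (Python never indexes d outside them)
def dA (cur tmp : Int) : Int × Int :=
  match cur, tmp with
  | 0, 0 => (0, 1) | 0, 1 => (1, 1)  | 0, 2 => (2, 1)  | 0, 3 => (3, 1)
  | 1, 0 => (1, 1) | 1, 1 => (0, -1) | 1, 2 => (3, 1)  | 1, 3 => (2, -1)
  | 2, 0 => (2, 1) | 2, 1 => (3, -1) | 2, 2 => (0, -1) | 2, 3 => (1, 1)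
  | 3, 0 => (3, 1) | 3, 1 => (2, 1)  | 3, 2 => (1, -1) | 3, 3 => (0, -1)
  | _, _ => (0, 0)

-- the if/elif/else classification of s[p] into tmp (shared by both Pythons verbatim)
def charT (c : Char) : Int := if c = 'i' then 1 else if c = 'j' then 2 else 3

-- A's first and second while loops (identical code, different stop state t);
-- the remaining list plays the role of the suffix s[p:]
def loopT (t : Int) : Int → Int → List Char → Int × Int × List Char
  | cur, b, [] => (cur, b, [])
  | cur, b, c :: cs =>
    if cur = t ∧ b = 1 then (cur, b, c :: cs)
    else
      let r := dA cur (charT c)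
      loopT t r.1 (b * r.2) cs

-- A's third while loop: run to the end of the string
def loop3 : Int → Int → List Char → Int × Int
  | cur, b, [] => (cur, b)
  | cur, b, c :: cs =>
    let r := dA cur (charT c)
    loop3 r.1 (b * r.2) cs

def check (s : String) : Bool :=
  let r1 := loopT 1 0 1 s.toList
  if r1.2.2 = [] then false
  else
    let r2 := loopT 2 0 1 r1.2.2
    if r2.2.2 = [] then false
    else
      let r3 := loop3 0 1 r2.2.2
      if r3.1 ≠ 3 ∨ r3.2 ≠ 1 then false else true

-- ===== PORT B =====
-- one step of B's cumulative fold: state = (cur, sg, stage, ok)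
def stepB (st : Int × Int × Int × Bool) (c : Char) : Int × Int × Int × Bool :=
  let ok' := if st.2.2.1 = 2 then true else st.2.2.2
  let r := dA st.1 (charT c)
  let cur' := r.1
  let sg' := st.2.1 * r.2
  let stage' :=
    if st.2.2.1 = 0 ∧ cur' = 1 ∧ sg' = 1 then 1
    else if st.2.2.1 = 1 ∧ cur' = 3 ∧ sg' = 1 then 2
    else st.2.2.1
  (cur', sg', stage', ok')

def check_alt (s : String) : Bool :=
  let fin := s.toList.foldl stepB (0, 1, 0, false)
  fin.2.2.2 && (fin.1 == 0) && (fin.2.1 == -1)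

-- ===== PRECONDITION & SPEC =====
def Spec_check (s : String) (out : Bool) : Prop := out = check_alt s
instance (s : String) (out : Bool) : Decidable (Spec_check s out) := by unfold Spec_check; infer_instance

-- ===== CLAIM (what is proved, stated in full; the proofs are below) =====
def Claim_equal_check : Prop := ∀ (s : String), Dom_check s → Spec_check s (check s)

-- ===== LEMMAS AND PROOFS =====

-- a quaternion state (cur, b): cur ∈ {0,1,2,3} names the unit 1,i,j,k and b ∈ {1,-1} its sign
def Valid (cur b : Int) : Prop := (cur = 0 ∨ cur = 1 ∨ cur = 2 ∨ cur = 3) ∧ (b = 1 ∨ b = -1)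

-- one multiplication step by unit t, as both ports perform it
def step1 (cur b t : Int) : Int × Int := ((dA cur t).1, b * (dA cur t).2)

-- group multiplication of two states
def gmul (p q : Int × Int) : Int × Int := ((dA p.1 q.1).1, p.2 * q.2 * (dA p.1 q.1).2)

lemma charT_cases (c : Char) : charT c = 1 ∨ charT c = 2 ∨ charT c = 3 := by
  unfold charT; split_ifs <;> simp

lemma valid_step1 {cur b t : Int} (h : Valid cur b) (ht : t = 1 ∨ t = 2 ∨ t = 3) :
    Valid (step1 cur b t).1 (step1 cur b t).2 := by
  obtain ⟨h1, h2⟩ := h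
  rcases h1 with rfl | rfl | rfl | rfl <;> rcases h2 with rfl | rfl <;>
    rcases ht with rfl | rfl | rfl <;> (unfold Valid; decide)

lemma step1_gmul {g1 g2 cur b t : Int} (hg : Valid g1 g2) (hp : Valid cur b)
    (ht : t = 1 ∨ t = 2 ∨ t = 3) :
    step1 (gmul (g1, g2) (cur, b)).1 (gmul (g1, g2) (cur, b)).2 t
      = gmul (g1, g2) (step1 cur b t) := by
  obtain ⟨hg1, hg2⟩ := hg
  obtain ⟨hp1, hp2⟩ := hp
  rcases hg1 with rfl | rfl | rfl | rfl <;> rcases hg2 with rfl | rfl <;>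
    rcases hp1 with rfl | rfl | rfl | rfl <;> rcases hp2 with rfl | rfl <;>
    rcases ht with rfl | rfl | rfl <;> decide

lemma gmul_i_eq_k {cur b : Int} (h : Valid cur b) :
    gmul (1, 1) (cur, b) = (3, 1) ↔ cur = 2 ∧ b = 1 := by
  obtain ⟨h1, h2⟩ := h
  rcases h1 with rfl | rfl | rfl | rfl <;> rcases h2 with rfl | rfl <;> decide

lemma gmul_k_eq_neg1 {cur b : Int} (h : Valid cur b) :
    gmul (3, 1) (cur, b) = (0, -1) ↔ cur = 3 ∧ b = 1 := by
  obtain ⟨h1, h2⟩ := h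
  rcases h1 with rfl | rfl | rfl | rfl <;> rcases h2 with rfl | rfl <;> decide

lemma loopT_cons (t cur b : Int) (c : Char) (cs : List Char) :
    loopT t cur b (c :: cs)
      = if cur = t ∧ b = 1 then (cur, b, c :: cs)
        else loopT t (step1 cur b (charT c)).1 (step1 cur b (charT c)).2 cs := rfl

lemma loop3_cons (cur b : Int) (c : Char) (cs : List Char) :
    loop3 cur b (c :: cs) = loop3 (step1 cur b (charT c)).1 (step1 cur b (charT c)).2 cs := rfl

lemma loopT_self (t cur b : Int) (h : cur = t ∧ b = 1) (cs : List Char) :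
    loopT t cur b cs = (cur, b, cs) := by
  cases cs with
  | nil => rfl
  | cons c cs => rw [loopT_cons, if_pos h]

lemma loop3_valid (cs : List Char) : ∀ cur b, Valid cur b →
    Valid (loop3 cur b cs).1 (loop3 cur b cs).2 := by
  induction cs with
  | nil => intro cur b h; exact h
  | cons c cs ih =>
    intro cur b h
    rw [loop3_cons]
    exact ih _ _ (valid_step1 h (charT_cases c))

lemma stepB_eq (cur sg stage : Int) (ok : Bool) (c : Char) :
    stepB (cur, sg, stage, ok) c
      = ((step1 cur sg (charT c)).1, (step1 cur sg (charT c)).2,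
         (if stage = 0 ∧ (step1 cur sg (charT c)).1 = 1 ∧ (step1 cur sg (charT c)).2 = 1 then 1
          else if stage = 1 ∧ (step1 cur sg (charT c)).1 = 3 ∧ (step1 cur sg (charT c)).2 = 1 then 2
          else stage),
         (if stage = 2 then true else ok)) := rfl

-- Phase 1: while B is in stage 0 its cumulative state equals A's loop-1 state
lemma fold_stage0 (cs : List Char) : ∀ cur b (ok : Bool), Valid cur b → ¬(cur = 1 ∧ b = 1) →
    (if (loopT 1 cur b cs).1 = 1 ∧ (loopT 1 cur b cs).2.1 = 1 then
      List.foldl stepB (cur, b, 0, ok) cs = List.foldl stepB (1, 1, 1, ok) (loopT 1 cur b cs).2.2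
    else
      List.foldl stepB (cur, b, 0, ok) cs
        = ((loopT 1 cur b cs).1, (loopT 1 cur b cs).2.1, 0, ok)
        ∧ (loopT 1 cur b cs).2.2 = []) := by
  induction cs with
  | nil =>
    intro cur b ok hv hne
    rw [if_neg]
    · exact ⟨rfl, rfl⟩
    · simpa [loopT] using hne
  | cons c cs ih =>
    intro cur b ok hv hne
    rw [loopT_cons, if_neg hne, List.foldl_cons, stepB_eq]
    set p := step1 cur b (charT c) with hp
    have hpv : Valid p.1 p.2 := valid_step1 hv (charT_cases c)
    by_cases h2 : p.1 = 1 ∧ p.2 = 1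
    · obtain ⟨e1, e2⟩ := h2
      rw [loopT_self 1 p.1 p.2 ⟨e1, e2⟩]
      simp [e1, e2]
    · have hih := ih p.1 p.2 ok hpv h2
      have hs : (if (0 : Int) = 0 ∧ p.1 = 1 ∧ p.2 = 1 then (1 : Int)
          else if (0 : Int) = 1 ∧ p.1 = 3 ∧ p.2 = 1 then 2 else 0) = 0 := by
        rw [if_neg (by simpa using h2), if_neg (by norm_num)]
      have ho : (if (0 : Int) = 2 then true else ok) = ok := by norm_num
      rw [hs, ho]
      exact hih

-- Phase 2: while B is in stage 1 its cumulative state equals i times A's loop-2 state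
lemma fold_stage1 (cs : List Char) : ∀ cur b (ok : Bool), Valid cur b → ¬(cur = 2 ∧ b = 1) →
    (if (loopT 2 cur b cs).1 = 2 ∧ (loopT 2 cur b cs).2.1 = 1 then
      List.foldl stepB ((gmul (1,1) (cur, b)).1, (gmul (1,1) (cur, b)).2, 1, ok) cs
        = List.foldl stepB (3, 1, 2, ok) (loopT 2 cur b cs).2.2
    else
      List.foldl stepB ((gmul (1,1) (cur, b)).1, (gmul (1,1) (cur, b)).2, 1, ok) cs
        = ((gmul (1,1) ((loopT 2 cur b cs).1, (loopT 2 cur b cs).2.1)).1,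
           (gmul (1,1) ((loopT 2 cur b cs).1, (loopT 2 cur b cs).2.1)).2, 1, ok)
        ∧ (loopT 2 cur b cs).2.2 = []) := by
  induction cs with
  | nil =>
    intro cur b ok hv hne
    rw [if_neg]
    · exact ⟨rfl, rfl⟩
    · simpa [loopT] using hne
  | cons c cs ih =>
    intro cur b ok hv hne
    have hvi : Valid 1 1 := ⟨Or.inr (Or.inl rfl), Or.inl rfl⟩
    rw [loopT_cons, if_neg hne, List.foldl_cons, stepB_eq,
        step1_gmul hvi hv (charT_cases c)]
    set p := step1 cur b (charT c) with hp
    have hpv : Valid p.1 p.2 := valid_step1 hv (charT_cases c)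
    have hiff : gmul (1, 1) p = (3, 1) ↔ p.1 = 2 ∧ p.2 = 1 := gmul_i_eq_k hpv
    by_cases h2 : p.1 = 2 ∧ p.2 = 1
    · have hk : gmul (1, 1) p = (3, 1) := hiff.mpr h2
      rw [loopT_self 2 p.1 p.2 h2]
      simp [h2.1, h2.2, hk]
    · have hih := ih p.1 p.2 ok hpv h2
      have hnk : ¬(gmul (1, 1) p = (3, 1)) := fun h => h2 (hiff.mp h)
      have hs : (if (1 : Int) = 0 ∧ (gmul (1,1) p).1 = 1 ∧ (gmul (1,1) p).2 = 1 then (1 : Int)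
          else if (1 : Int) = 1 ∧ (gmul (1,1) p).1 = 3 ∧ (gmul (1,1) p).2 = 1 then 2 else 1) = 1 := by
        rw [if_neg (by norm_num), if_neg]
        intro hcontra
        exact hnk (Prod.ext hcontra.2.1 hcontra.2.2)
      have ho : (if (1 : Int) = 2 then true else ok) = ok := by norm_num
      rw [hs, ho]
      exact hih

-- Phase 3: in stage 2 B's cumulative state equals k times A's loop-3 state,
-- and ok records that the suffix after the second split is nonempty
lemma fold_stage2 (cs : List Char) : ∀ cur b (ok : Bool), Valid cur b →
    List.foldl stepB ((gmul (3,1) (cur, b)).1, (gmul (3,1) (cur, b)).2, 2, ok) cs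
      = ((gmul (3,1) (loop3 cur b cs)).1, (gmul (3,1) (loop3 cur b cs)).2, 2,
          ok || !cs.isEmpty) := by
  induction cs with
  | nil => intro cur b ok hv; simp [loop3]
  | cons c cs ih =>
    intro cur b ok hv
    have hvk : Valid 3 1 := ⟨Or.inr (Or.inr (Or.inr rfl)), Or.inl rfl⟩
    rw [List.foldl_cons, stepB_eq, step1_gmul hvk hv (charT_cases c), loop3_cons]
    set p := step1 cur b (charT c) with hp
    have hpv : Valid p.1 p.2 := valid_step1 hv (charT_cases c)
    have hs : (if (2 : Int) = 0 ∧ (gmul (3,1) p).1 = 1 ∧ (gmul (3,1) p).2 = 1 then (1 : Int)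
        else if (2 : Int) = 1 ∧ (gmul (3,1) p).1 = 3 ∧ (gmul (3,1) p).2 = 1 then 2 else 2) = 2 := by
      rw [if_neg (by norm_num), if_neg (by norm_num)]
    have ho : (if (2 : Int) = 2 then true else ok) = true := by norm_num
    rw [hs, ho, ih p.1 p.2 true hpv]
    simp

-- ===== VERDICT (by name: the statement is the Claim_ definition above) =====
set_option maxHeartbeats 1000000 in
theorem check_spec : Claim_equal_check := by
  intro s _
  unfold Spec_check check check_alt
  have v01 : Valid 0 1 := ⟨Or.inl rfl, Or.inl rfl⟩
  set l := s.toList with hl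
  have h0 := fold_stage0 l 0 1 false v01 (by norm_num)
  by_cases hc1 : (loopT 1 0 1 l).1 = 1 ∧ (loopT 1 0 1 l).2.1 = 1
  · rw [if_pos hc1] at h0
    by_cases he1 : (loopT 1 0 1 l).2.2 = []
    · rw [if_pos he1]
      rw [he1] at h0
      simp [h0]
    · rw [if_neg he1]
      have h1 := fold_stage1 (loopT 1 0 1 l).2.2 0 1 false v01 (by norm_num)
      have hg11 : gmul (1,1) ((0 : Int), (1 : Int)) = (1, 1) := by decide
      rw [hg11] at h1
      by_cases hc2 : (loopT 2 0 1 (loopT 1 0 1 l).2.2).1 = 2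
          ∧ (loopT 2 0 1 (loopT 1 0 1 l).2.2).2.1 = 1
      · rw [if_pos hc2] at h1
        by_cases he2 : (loopT 2 0 1 (loopT 1 0 1 l).2.2).2.2 = []
        · rw [if_pos he2]
          rw [he2] at h1
          rw [h0, h1]
          simp
        · rw [if_neg he2]
          have h2 := fold_stage2 (loopT 2 0 1 (loopT 1 0 1 l).2.2).2.2 0 1 false v01
          have hg31 : gmul (3,1) ((0 : Int), (1 : Int)) = (3, 1) := by decide
          rw [hg31] at h2
          set r3 := loop3 0 1 (loopT 2 0 1 (loopT 1 0 1 l).2.2).2.2 with hr3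
          have hr3v : Valid r3.1 r3.2 := loop3_valid _ 0 1 v01
          have hiff : gmul (3, 1) r3 = (0, -1) ↔ r3.1 = 3 ∧ r3.2 = 1 := gmul_k_eq_neg1 hr3v
          have hne : ((loopT 2 0 1 (loopT 1 0 1 l).2.2).2.2).isEmpty = false := by
            cases hx : (loopT 2 0 1 (loopT 1 0 1 l).2.2).2.2 with
            | nil => exact absurd hx he2
            | cons a as => simp
          rw [h0, h1, h2, hne]
          by_cases h3 : r3.1 = 3 ∧ r3.2 = 1
          · have hk : gmul (3, 1) r3 = (0, -1) := hiff.mpr h3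
            rw [if_neg (by simp [h3.1, h3.2])]
            simp [hk]
          · have hnk : gmul (3, 1) r3 ≠ (0, -1) := fun h => h3 (hiff.mp h)
            rw [if_pos (by tauto)]
            have : ¬((gmul (3,1) r3).1 = 0 ∧ (gmul (3,1) r3).2 = -1) := by
              intro hcontra
              exact hnk (Prod.ext hcontra.1 hcontra.2)
            rcases not_and_or.mp this with hx | hx <;> simp [hx]
      · rw [if_neg hc2] at h1
        have he2 := h1.2
        rw [if_pos he2, h0, h1.1]
        simp
  · rw [if_neg hc1] at h0
    rw [if_pos h0.2, h0.1]
    simp
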